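-- pv_equiv track=rewrite | github.com/AndreeSalazar/PyDead-BIB | Metal_Dead/integrations/llm_bridge.py | llm_pytorch_forward
-- ===== SOURCE A (Python) =====
-- def llm_pytorch_forward(token_id, vocab, layers):
--     h = token_id * 31 + 7
--     i = 0
--     while i < layers:
--         h = h * 17 + 13
--         h = h % 65536
--         i = i + 1
--     return h % vocab
-- ===== SOURCE B (Python) =====
-- def llm_pytorch_forward(token_id, vocab, layers):
--     # Compose the affine map x -> (17*x + 13) % 65536 with itself `layers` times
--     # by binary exponentiation, then apply it once: O(log layers) instead of O(layers).
--     h = token_id * 31 + 7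
--     if layers > 0:
--         M = 65536
--         a, b = 1, 0        # accumulated map x -> a*x + b (mod M)
--         ca, cb = 17, 13    # current repeated-squared map
--         n = layers
--         while n:
--             if n & 1:
--                 a, b = (ca * a) % M, (ca * b + cb) % M
--             ca, cb = (ca * ca) % M, (ca * cb + cb) % M
--             n >>= 1
--         h = (a * h + b) % M
--     return h % vocab
-- ===== Notes on version B (the rewrite author's own statement) =====
-- stated objective: faster
-- what changed: Replaced the layer-by-layer loop with binary exponentiation of the affine map x -> (17x+13) mod 65536, composing it in O(log layers) and applying it once.
import Mathlib
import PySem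

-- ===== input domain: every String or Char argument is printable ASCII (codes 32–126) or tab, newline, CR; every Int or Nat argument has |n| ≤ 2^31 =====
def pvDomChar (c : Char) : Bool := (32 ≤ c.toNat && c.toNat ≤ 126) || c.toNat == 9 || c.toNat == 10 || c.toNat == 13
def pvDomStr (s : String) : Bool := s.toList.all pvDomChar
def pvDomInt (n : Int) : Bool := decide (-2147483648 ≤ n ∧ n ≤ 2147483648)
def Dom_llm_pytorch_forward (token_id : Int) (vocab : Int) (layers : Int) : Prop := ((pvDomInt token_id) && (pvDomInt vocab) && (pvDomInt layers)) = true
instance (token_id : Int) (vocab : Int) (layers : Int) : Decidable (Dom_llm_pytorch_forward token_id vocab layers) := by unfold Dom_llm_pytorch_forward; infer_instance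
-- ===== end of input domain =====

-- B composes the affine step map by binary exponentiation (O(log layers)) instead of
-- iterating it layer by layer (O(layers)); return values proved equal whenever vocab ≠ 0.


-- ===== PORT A =====
-- A's while loop: i counts 0,1,…; ported as structural recursion on the remaining (layers - i) iterations.
def pvLoopA (h : Int) : Nat → Int
  | 0 => h
  | n + 1 => pvLoopA (PySem.Int.mod (h * 17 + 13) 65536) n

def llm_pytorch_forward (token_id : Int) (vocab : Int) (layers : Int) : Int :=
  PySem.Int.mod (pvLoopA (token_id * 31 + 7) layers.toNat) vocab

-- ===== PORT B =====
-- B's while loop over the bits of n: (a,b) accumulated affine map, (ca,cb) repeatedly squared map.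
def pvBinLoop (n : Nat) (a b ca cb : Int) : Int × Int :=
  if hn : n = 0 then (a, b)
  else
    let a' := if n % 2 = 1 then PySem.Int.mod (ca * a) 65536 else a
    let b' := if n % 2 = 1 then PySem.Int.mod (ca * b + cb) 65536 else b
    pvBinLoop (n / 2) a' b' (PySem.Int.mod (ca * ca) 65536) (PySem.Int.mod (ca * cb + cb) 65536)
  decreasing_by exact Nat.div_lt_self (Nat.pos_of_ne_zero hn) (by omega)

def llm_pytorch_forward_alt (token_id : Int) (vocab : Int) (layers : Int) : Int :=
  let h0 := token_id * 31 + 7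
  if 0 < layers then
    let p := pvBinLoop layers.toNat 1 0 17 13
    PySem.Int.mod (PySem.Int.mod (p.1 * h0 + p.2) 65536) vocab
  else
    PySem.Int.mod h0 vocab

-- ===== PRECONDITION & SPEC =====
-- vocab = 0 makes A's final `h % vocab` raise ZeroDivisionError, so it is excluded.
def Pre_llm_pytorch_forward (token_id : Int) (vocab : Int) (layers : Int) : Prop := vocab ≠ 0
instance (token_id : Int) (vocab : Int) (layers : Int) : Decidable (Pre_llm_pytorch_forward token_id vocab layers) := by unfold Pre_llm_pytorch_forward; infer_instance
def pvWitness_llm_pytorch_forward : Int × Int × Int := (5, 50257, 12)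

def Spec_llm_pytorch_forward (token_id : Int) (vocab : Int) (layers : Int) (out : Int) : Prop := out = llm_pytorch_forward_alt token_id vocab layers
instance (token_id : Int) (vocab : Int) (layers : Int) (out : Int) : Decidable (Spec_llm_pytorch_forward token_id vocab layers out) := by unfold Spec_llm_pytorch_forward; infer_instance

-- ===== CLAIM (what is proved, stated in full; the proofs are below) =====
def Claim_equal_llm_pytorch_forward : Prop := ∀ (token_id : Int) (vocab : Int) (layers : Int), Dom_llm_pytorch_forward token_id vocab layers → Pre_llm_pytorch_forward token_id vocab layers → Spec_llm_pytorch_forward token_id vocab layers (llm_pytorch_forward token_id vocab layers)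

-- ===== LEMMAS AND PROOFS =====

-- proof-side iterator of an arbitrary affine step map (ca,cb) mod 65536
def pvIter (ca cb : Int) : Nat → Int → Int
  | 0, x => x
  | n + 1, x => pvIter ca cb n (PySem.Int.mod (ca * x + cb) 65536)

theorem pvLoopA_eq_iter (n : Nat) : ∀ h : Int, pvLoopA h n = pvIter 17 13 n h := by
  induction n with
  | zero => intro h; rfl
  | succ n ih =>
      intro h
      show pvLoopA (PySem.Int.mod (h * 17 + 13) 65536) n = pvIter 17 13 n (PySem.Int.mod (17 * h + 13) 65536)
      rw [ih, mul_comm h 17]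

theorem pv_step_mod (c1 c2 x : Int) :
    PySem.Int.mod (c1 * PySem.Int.mod x 65536 + c2) 65536 = PySem.Int.mod (c1 * x + c2) 65536 := by
  simp only [PySem.Int.mod_eq_emod_of_pos (by norm_num : (0:Int) < 65536)]
  conv_lhs => rw [Int.add_emod, Int.mul_emod, Int.emod_emod_of_dvd _ dvd_rfl, ← Int.mul_emod, ← Int.add_emod]

theorem pv_mod_coeffs (s t x : Int) :
    PySem.Int.mod (PySem.Int.mod s 65536 * x + PySem.Int.mod t 65536) 65536 = PySem.Int.mod (s * x + t) 65536 := by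
  simp only [PySem.Int.mod_eq_emod_of_pos (by norm_num : (0:Int) < 65536)]
  conv_lhs => rw [Int.add_emod, Int.mul_emod, Int.emod_emod_of_dvd _ dvd_rfl, Int.emod_emod_of_dvd _ dvd_rfl,
    ← Int.mul_emod, ← Int.add_emod]

theorem pvIter_add (ca cb : Int) (m : Nat) : ∀ (n : Nat) (x : Int),
    pvIter ca cb m (pvIter ca cb n x) = pvIter ca cb (n + m) x := by
  intro n
  induction n with
  | zero => intro x; rw [Nat.zero_add]; rfl
  | succ n ih =>
      intro x
      have h : n + 1 + m = (n + m) + 1 := by omega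
      rw [h]
      show pvIter ca cb m (pvIter ca cb n _) = pvIter ca cb (n + m) _
      rw [ih]

theorem pvIter_double (ca cb : Int) (k : Nat) : ∀ x : Int,
    pvIter (PySem.Int.mod (ca * ca) 65536) (PySem.Int.mod (ca * cb + cb) 65536) k x = pvIter ca cb (2 * k) x := by
  induction k with
  | zero => intro x; rfl
  | succ k ih =>
      intro x
      show pvIter _ _ k (PySem.Int.mod (PySem.Int.mod (ca*ca) 65536 * x + PySem.Int.mod (ca*cb+cb) 65536) 65536)
          = pvIter ca cb (2 * (k+1)) x
      rw [pv_mod_coeffs]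
      have h1 : ca * ca * x + (ca * cb + cb) = ca * (ca * x + cb) + cb := by ring
      rw [h1, ← pv_step_mod ca cb (ca * x + cb)]
      rw [ih]
      have h2 : 2 * (k + 1) = 2 * k + 1 + 1 := by omega
      rw [h2]
      rfl

theorem pvBinLoop_correct : ∀ (n : Nat) (a b ca cb x : Int),
    PySem.Int.mod ((pvBinLoop n a b ca cb).1 * x + (pvBinLoop n a b ca cb).2) 65536
      = pvIter ca cb n (PySem.Int.mod (a * x + b) 65536) := by
  intro n
  induction n using Nat.strong_induction_on with
  | _ n ih =>
    intro a b ca cb x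
    by_cases hn : n = 0
    · subst hn; rw [pvBinLoop]; simp [pvIter]
    · rw [pvBinLoop, dif_neg hn]
      simp only
      rw [ih (n / 2) (Nat.div_lt_self (Nat.pos_of_ne_zero hn) (by omega))]
      by_cases hodd : n % 2 = 1
      · simp only [hodd, if_true]
        rw [pv_mod_coeffs]
        have h1 : ca * a * x + (ca * b + cb) = ca * (a * x + b) + cb := by ring
        rw [h1, ← pv_step_mod ca cb (a * x + b)]
        have : PySem.Int.mod (ca * PySem.Int.mod (a * x + b) 65536 + cb) 65536
            = pvIter ca cb 1 (PySem.Int.mod (a * x + b) 65536) := rfl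
        rw [this, pvIter_double, pvIter_add]
        congr 1
        omega
      · simp only [if_neg hodd]
        rw [pvIter_double]
        congr 1
        omega

theorem pvIter_absorb (n : Nat) (hn : n ≠ 0) (ca cb x : Int) :
    pvIter ca cb n (PySem.Int.mod x 65536) = pvIter ca cb n x := by
  obtain ⟨k, rfl⟩ : ∃ k, n = k + 1 := ⟨n - 1, by omega⟩
  show pvIter ca cb k (PySem.Int.mod (ca * PySem.Int.mod x 65536 + cb) 65536)
      = pvIter ca cb k (PySem.Int.mod (ca * x + cb) 65536)
  rw [pv_step_mod]

-- ===== VERDICT (by name: the statement is the Claim_ definition above) =====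
theorem llm_pytorch_forward_spec : Claim_equal_llm_pytorch_forward := by
  intro token_id vocab layers _ _
  unfold Spec_llm_pytorch_forward llm_pytorch_forward llm_pytorch_forward_alt
  by_cases hl : 0 < layers
  · simp only [if_pos hl]
    have hn : layers.toNat ≠ 0 := by omega
    rw [pvBinLoop_correct, pvLoopA_eq_iter]
    have h1 : (1 : Int) * (token_id * 31 + 7) + 0 = token_id * 31 + 7 := by ring
    rw [h1, pvIter_absorb _ hn]
  · simp only [if_neg hl]
    have : layers.toNat = 0 := by omega
    rw [this]
    rfl
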